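-- pv_equiv track=rewrite | github.com/SomeStein/maskmatch | maskmatch/core.py | precombine_groups
-- ===== SOURCE A (Python) =====
-- def backtrack_multiplicity(
--     group_masks, masks, multiplicity, current_indices, current_mask=0, start_idx=0
-- ):
--     """
--     Enumerate all combinations of 'multiplicity' masks from 'masks' list
--     such that no two masks overlap (bitwise AND == 0), and append the
--     combined mask to 'group_masks'.
--
--     Parameters:
--     - group_masks: list[int], accumulates the combined masks of valid tuples
--     - masks: list[int], the candidate masks to combine
--     - multiplicity: int, number of masks to select
--     - current_indices: list[int], indices of masks chosen so far (for recursion)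
--     - current_mask: int, OR of currently chosen masks
--     - start_idx: int, index in masks to start searching (to avoid duplicates)
--     """
--
--     # Base case: desired multiplicity reached
--     if len(current_indices) == multiplicity:
--         group_masks.append(current_mask)
--         return
--
--     # Iterate over remaining masks
--     for idx in range(start_idx, len(masks)):
--         mask = masks[idx]
--         # Only choose if disjoint with current selection
--         if (current_mask & mask) == 0:
--             # Recursive call, increment start_idx to prevent duplicates
--             backtrack_multiplicity(
--                 group_masks,
--                 masks,
--                 multiplicity,
--                 current_indices + [idx],
--                 current_mask | mask,
--                 idx + 1,
--             )
--
-- def precombine_groups(groups):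
--     result = []
--     for masks, multiplicity in groups:
--
--         group_masks = []
--         current_indeces = []
--
--         backtrack_multiplicity(group_masks, masks, multiplicity, current_indeces)
--
--         result.append((group_masks, multiplicity))
--
--     return result
-- ===== SOURCE B (Python) =====
-- def to_linked(masks):
--     # cons-list (head, tail) / None, so recursion shares tails instead of slicing
--     lnk = None
--     for m in reversed(masks):
--         lnk = (m, lnk)
--     return lnk
--
--
-- def disjoint_ors(lnk, r, acc):
--     # All ORs of r pairwise-disjoint masks chosen from the cons-list 'lnk'
--     # (in lexicographic choose/skip order), each disjoint from 'acc'.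
--     if r == 0:
--         return [acc]
--     if lnk is None:
--         return []
--     head, tail = lnk
--     chosen = disjoint_ors(tail, r - 1, acc | head) if (acc & head) == 0 else []
--     return chosen + disjoint_ors(tail, r, acc)
--
--
-- def precombine_groups(groups):
--     return [(disjoint_ors(to_linked(masks), multiplicity, 0), multiplicity)
--             for masks, multiplicity in groups]
-- ===== Notes on version B (the rewrite author's own statement) =====
-- stated objective: simpler
-- what changed: Replaced the index-tracking recursive backtracker (range loop, start_idx, current_indices list, mutable output accumulator) by a pure choose/skip structural recursion over a cons list built from the masks, returning its list of combined ORs directly, with the same disjointness pruning.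
import Mathlib
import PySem

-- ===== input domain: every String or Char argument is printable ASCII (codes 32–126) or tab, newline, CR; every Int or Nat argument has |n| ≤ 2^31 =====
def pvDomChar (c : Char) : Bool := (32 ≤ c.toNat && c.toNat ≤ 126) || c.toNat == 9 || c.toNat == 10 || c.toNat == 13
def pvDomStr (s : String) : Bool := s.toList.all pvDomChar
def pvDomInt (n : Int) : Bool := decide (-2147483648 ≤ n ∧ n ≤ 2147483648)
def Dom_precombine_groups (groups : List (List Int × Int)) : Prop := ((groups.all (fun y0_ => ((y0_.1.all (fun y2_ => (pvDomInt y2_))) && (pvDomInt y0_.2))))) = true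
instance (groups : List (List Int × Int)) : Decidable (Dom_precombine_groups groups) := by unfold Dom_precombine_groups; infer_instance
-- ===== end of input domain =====

-- B replaces the index-tracking recursive backtracker by a choose/skip structural
-- recursion on the mask list (same pruning, no index bookkeeping): objective 'simpler'.

-- ===== PORT A =====
-- Python's inner 'for idx in range(start_idx, len(masks))' loop is ported as
-- recursion on start_idx; the base-case test is unchanged across loop iterations,
-- so re-testing it at each step computes the same values.
def backtrack_multiplicity (masks : List Int) (multiplicity : Int)
    (current_indices : List Int) (current_mask : Int) (start_idx : Nat) : List Int :=
  if (current_indices.length : Int) = multiplicity then [current_mask]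
  else if h : start_idx < masks.length then
    let mask := masks[start_idx]
    (if PySem.Int.band current_mask mask = 0 then
       backtrack_multiplicity masks multiplicity (current_indices ++ [(start_idx : Int)])
         (PySem.Int.bor current_mask mask) (start_idx + 1)
     else [])
    ++ backtrack_multiplicity masks multiplicity current_indices current_mask (start_idx + 1)
  else []
termination_by masks.length - start_idx

def precombine_groups (groups : List (List Int × Int)) : List (List Int × Int) :=
  groups.foldl (fun result g => result ++ [(backtrack_multiplicity g.1 g.2 [] 0 0, g.2)]) []

-- ===== PORT B =====
-- Source B's hand-rolled cons-list ((head, tail) / None) is exactly Lean's List;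
-- to_linked's reversed-foldl construction is ported literally.
def to_linked (masks : List Int) : List Int :=
  masks.reverse.foldl (fun lnk m => m :: lnk) []

def disjoint_ors (masks : List Int) (r : Int) (acc : Int) : List Int :=
  if r = 0 then [acc]
  else
    match masks with
    | [] => []
    | head :: tail =>
      (if PySem.Int.band acc head = 0 then disjoint_ors tail (r - 1) (PySem.Int.bor acc head) else [])
      ++ disjoint_ors tail r acc

def precombine_groups_alt (groups : List (List Int × Int)) : List (List Int × Int) :=
  groups.map (fun g => (disjoint_ors (to_linked g.1) g.2 0, g.2))

-- ===== PRECONDITION & SPEC =====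
def Spec_precombine_groups (groups : List (List Int × Int)) (out : List (List Int × Int)) : Prop := out = precombine_groups_alt groups
instance (groups : List (List Int × Int)) (out : List (List Int × Int)) : Decidable (Spec_precombine_groups groups out) := by unfold Spec_precombine_groups; infer_instance

-- ===== CLAIM (what is proved, stated in full; the proofs are below) =====
def Claim_equal_precombine_groups : Prop := ∀ (groups : List (List Int × Int)), Dom_precombine_groups groups → Spec_precombine_groups groups (precombine_groups groups)

-- ===== LEMMAS AND PROOFS =====

-- A's backtracker from position 'start' computes exactly B's choose/skip recursion
-- on the suffix, with remaining multiplicity 'multiplicity - current_indices.length'.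
theorem bt_eq (masks : List Int) (multiplicity : Int) :
    ∀ (k : Nat) (cur : List Int) (curMask : Int) (start : Nat),
      masks.length - start = k →
      backtrack_multiplicity masks multiplicity cur curMask start
        = disjoint_ors (masks.drop start) (multiplicity - cur.length) curMask := by
  intro k
  induction k with
  | zero =>
    intro cur curMask start hk
    rw [backtrack_multiplicity, disjoint_ors.eq_def]
    have hge : masks.length ≤ start := by omega
    rw [List.drop_eq_nil_of_le hge]
    by_cases hb : (cur.length : Int) = multiplicity
    · simp [hb]
    · have : ¬ (multiplicity - (cur.length : Int) = 0) := by omega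
      simp [hb, this, hge]
  | succ n ih =>
    intro cur curMask start hk
    have hlt : start < masks.length := by omega
    rw [backtrack_multiplicity]
    by_cases hb : (cur.length : Int) = multiplicity
    · rw [disjoint_ors.eq_def]
      simp [hb]
    · have hr : ¬ (multiplicity - (cur.length : Int) = 0) := by omega
      have hdrop : masks.drop start = masks[start] :: masks.drop (start + 1) :=
        List.drop_eq_getElem_cons hlt
      rw [hdrop, disjoint_ors.eq_def]
      simp only [hb, if_false, hlt, dif_pos, hr]
      have h1 := ih (cur ++ [(start : Int)]) (PySem.Int.bor curMask masks[start]) (start + 1) (by omega)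
      have h2 := ih cur curMask (start + 1) (by omega)
      rw [h1, h2]
      have hlen : ((cur ++ [(start : Int)]).length : Int) = (cur.length : Int) + 1 := by
        simp
      rw [hlen]
      ring_nf

theorem foldl_cons_eq_reverse_append {α : Type} :
    ∀ (l : List α) (acc : List α),
      l.foldl (fun s m => m :: s) acc = l.reverse ++ acc := by
  intro l
  induction l with
  | nil => simp
  | cons x xs ih => intro acc; simp [List.foldl, ih]

theorem to_linked_eq (masks : List Int) : to_linked masks = masks := by
  unfold to_linked
  rw [foldl_cons_eq_reverse_append]
  simp

theorem foldl_append_map {α β : Type} (f : α → β) :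
    ∀ (l : List α) (acc : List β),
      l.foldl (fun r g => r ++ [f g]) acc = acc ++ l.map f := by
  intro l
  induction l with
  | nil => simp
  | cons x xs ih => intro acc; simp [List.foldl, ih]

-- ===== VERDICT (by name: the statement is the Claim_ definition above) =====
theorem precombine_groups_spec : Claim_equal_precombine_groups := by
  intro groups _
  unfold Spec_precombine_groups precombine_groups precombine_groups_alt
  rw [foldl_append_map]
  simp only [List.nil_append]
  apply List.map_congr_left
  intro g _
  rw [to_linked_eq]
  have := bt_eq g.1 g.2 g.1.length [] 0 0 (by omega)
  simpa using this
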